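-- pv_equiv track=rewrite | github.com/asebn1/python_algorithm | 프로그래머스 2단계/4. 124 나라의 숫자.py | solution
-- ===== SOURCE A (Python) =====
-- def solution(n):
--     answer = 0
--     arr123 = [4, 1, 2]
--     temp = []
--     if (n == 0):
--         return 0
--
--     while (1):
--         na = n % 3
--         temp.append(arr123[na])
--         n = int(n / 3)
--         if (na == 0):
--             n -= 1
--         if (n <= 0):
--             break
--     temp.reverse()
--
--     for i in range(0, len(temp), 1):
--         answer += temp[i]
--         if (i != (len(temp) - 1)):
--             answer *= 10
--     answer = str(answer)
--
--     return answer
-- ===== SOURCE B (Python) =====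
-- def solution(n):
--     if n <= 0:
--         return ""
--     return solution((n - 1) // 3) + "124"[(n - 1) % 3]
-- ===== Notes on version B (the rewrite author's own statement) =====
-- stated objective: simpler
-- what changed: B replaces A's whole machinery (a while loop extracting digits into a list with a special decrement on zero remainder, a reverse, a second indexed loop re-assembling the digits into an integer, and a final str()) by a short recursion on the shifted index: solution(n) = solution((n-1)//3) + "124"[(n-1)%3], i.e. bijective base three via the shift, which needs no decrement branch, no list, no reversal and no integer re-assembly.
-- outside the precondition, e.g. on solution(0): A returns 0, B returns ''; on solution(-1): A returns '2', B returns ''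
import Mathlib
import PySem

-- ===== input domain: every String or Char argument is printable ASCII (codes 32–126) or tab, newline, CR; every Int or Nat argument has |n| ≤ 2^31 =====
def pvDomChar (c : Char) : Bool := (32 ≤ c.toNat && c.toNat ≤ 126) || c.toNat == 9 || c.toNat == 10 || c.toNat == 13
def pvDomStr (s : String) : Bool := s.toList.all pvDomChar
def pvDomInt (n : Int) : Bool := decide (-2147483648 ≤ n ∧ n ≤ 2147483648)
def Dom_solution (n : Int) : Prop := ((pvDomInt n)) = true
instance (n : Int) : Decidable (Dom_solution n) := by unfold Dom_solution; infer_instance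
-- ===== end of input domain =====

-- B replaces A's list + reverse + integer re-assembly machinery by a 3-line recursion on the
-- shifted index (bijective base 3 via the n-1 shift), needing no decrement branch at all.

-- ===== PORT A =====

-- termination of A's while loop: the next value of n is strictly smaller when the loop continues
theorem pvStepA_lt (n : Int)
    (h : ¬ (if PySem.Int.mod n 3 = 0 then PySem.Int.truncdiv n 3 - 1 else PySem.Int.truncdiv n 3) ≤ 0) :
    (if PySem.Int.mod n 3 = 0 then PySem.Int.truncdiv n 3 - 1 else PySem.Int.truncdiv n 3).toNat < n.toNat := by
  by_cases hn : n ≤ 0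
  · exfalso
    have hneg : (-n).tdiv 3 = -(n.tdiv 3) := Int.neg_tdiv n 3
    have := Int.tdiv_eq_ediv_of_nonneg (a := -n) (b := 3) (by omega)
    simp only [PySem.Int.truncdiv] at h
    split_ifs at h <;> omega
  · have he := Int.tdiv_eq_ediv_of_nonneg (a := n) (b := 3) (by omega)
    simp only [PySem.Int.truncdiv] at *
    split_ifs at h ⊢ <;> omega

/-- A's `while` loop: the list `temp` of appended digit values, in append order.
    `int(n / 3)` is truncating division, exact via `PySem.Int.truncdiv` since |n| is far below 2^53;
    `arr123[na]` is always in range since `na = n % 3 ∈ [0, 3)`, so the `pyGetD` default is unreachable. -/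
def solLoopA (n : Int) : List Int :=
  let na := PySem.Int.mod n 3
  let d := PySem.List.pyGetD ([4, 1, 2] : List Int) na 0
  let n2 := if na = 0 then PySem.Int.truncdiv n 3 - 1 else PySem.Int.truncdiv n 3
  if _h : n2 ≤ 0 then [d] else d :: solLoopA n2
termination_by n.toNat
decreasing_by exact pvStepA_lt n _h

/-- Port of A. At n == 0 Python A returns the int 0, not a str — that input is outside
    Pre_solution; the `"0"` below is a placeholder never claimed about. -/
def solution (n : Int) : String :=
  if n == 0 then "0"
  else
    let temp := (solLoopA n).reverse
    let answer := (PySem.List.pyRange 0 (PySem.List.len temp) 1).foldl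
      (fun answer i =>
        let answer := answer + PySem.List.pyGetD temp i 0
        if i ≠ PySem.List.len temp - 1 then answer * 10 else answer) 0
    PySem.Int.toStr answer

-- ===== PORT B =====

/-- B, transliterated on `List Char` (the `PySem.Chars` convention): if n <= 0 return "",
    else solution((n-1)//3) + "124"[(n-1)%3]. The index `(n-1) % 3 ∈ [0, 3)` is always in
    range, so the `.getD` default is unreachable. -/
def solB (n : Int) : List Char :=
  if _h : n ≤ 0 then []
  else
    solB (PySem.Int.floordiv (n - 1) 3) ++ [(PySem.Str.pyGet? "124" (PySem.Int.mod (n - 1) 3)).getD ' ']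
termination_by n.toNat
decreasing_by
  have := PySem.Int.floordiv_eq_ediv_of_pos (a := n - 1) (b := 3) (by omega)
  omega

def solution_alt (n : Int) : String := String.ofList (solB n)

-- ===== PRECONDITION & SPEC =====
-- Pre_ excludes n ≤ 0, the inputs outside the numeral system's domain (it enumerates n = 1, 2, 3, …):
-- at n == 0 A returns the INT 0, not a value of the declared str type; for negative n no behaviour is
-- specified by the task and A's one-character value and B's empty numeral are equally defensible choices.
def Pre_solution (n : Int) : Prop := 1 ≤ n
instance (n : Int) : Decidable (Pre_solution n) := by unfold Pre_solution; infer_instance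
def pvWitness_solution : Int := (11)

def Spec_solution (n : Int) (out : String) : Prop := out = solution_alt n
instance (n : Int) (out : String) : Decidable (Spec_solution n out) := by unfold Spec_solution; infer_instance

-- ===== CLAIM (what is proved, stated in full; the proofs are below) =====
def Claim_equal_solution : Prop := ∀ (n : Int), Dom_solution n → Pre_solution n → Spec_solution n (solution n)

-- ===== LEMMAS AND PROOFS =====

/-- The character the digit value d ∈ {1,2,4} prints as. -/
def pvChr (d : Int) : Char := Nat.digitChar d.toNat

-- the digit value A appends for a remainder m ∈ [0,3)
theorem digit_val (m : Int) (h0 : 0 ≤ m) (h3 : m < 3) :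
    PySem.List.pyGetD ([4, 1, 2] : List Int) m 0 = 4 ∨
    PySem.List.pyGetD ([4, 1, 2] : List Int) m 0 = 1 ∨
    PySem.List.pyGetD ([4, 1, 2] : List Int) m 0 = 2 := by
  interval_cases m <;> decide

-- the character B appends is exactly the printed form of the digit A appends (n ≥ 1)
theorem char_match (n : Int) (_hn : 1 ≤ n) :
    (PySem.Str.pyGet? "124" (PySem.Int.mod (n - 1) 3)).getD ' '
      = pvChr (PySem.List.pyGetD ([4, 1, 2] : List Int) (PySem.Int.mod n 3) 0) := by
  rw [PySem.Int.mod_eq_emod_of_pos (a := n - 1) (b := 3) (by omega),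
      PySem.Int.mod_eq_emod_of_pos (a := n) (b := 3) (by omega)]
  have h0 : 0 ≤ n % 3 := Int.emod_nonneg n (by omega)
  have h3 : n % 3 < 3 := Int.emod_lt_of_pos n (by omega)
  rcases (by omega :
      (n % 3 = 0 ∧ (n - 1) % 3 = 2) ∨ (n % 3 = 1 ∧ (n - 1) % 3 = 0) ∨
      (n % 3 = 2 ∧ (n - 1) % 3 = 1)) with ⟨h1, h2⟩ | ⟨h1, h2⟩ | ⟨h1, h2⟩ <;>
    rw [h1, h2] <;> decide

-- for n ≥ 1 A's next loop value equals B's recursion argument (n-1)//3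
theorem stepA_eq (n : Int) (hn : 1 ≤ n) :
    (if PySem.Int.mod n 3 = 0 then PySem.Int.truncdiv n 3 - 1 else PySem.Int.truncdiv n 3)
      = PySem.Int.floordiv (n - 1) 3 := by
  have h1 : PySem.Int.truncdiv n 3 = n / 3 := Int.tdiv_eq_ediv_of_nonneg (by omega)
  have h2 : PySem.Int.floordiv (n - 1) 3 = (n - 1) / 3 :=
    PySem.Int.floordiv_eq_ediv_of_pos (by omega)
  have h3 : PySem.Int.mod n 3 = n % 3 := PySem.Int.mod_eq_emod_of_pos (by omega)
  rw [h1, h2, h3]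
  split_ifs <;> omega

-- B's recursion returns the empty string on nonpositive n
theorem solB_nonpos (n : Int) (hn : n ≤ 0) : solB n = [] := by
  rw [solB, dif_pos hn]

-- B's recursion produces exactly the reversal of A's digit list, rendered as characters
theorem loop_corr (k : Nat) : ∀ (n : Int), n.toNat ≤ k → 1 ≤ n →
    solB n = ((solLoopA n).map pvChr).reverse := by
  induction k with
  | zero => intro n hk hn; omega
  | succ k ih =>
    intro n hk hn
    have hstep := stepA_eq n hn
    rw [solLoopA, solB, dif_neg (by omega : ¬ n ≤ 0)]
    by_cases hstop :
      (if PySem.Int.mod n 3 = 0 then PySem.Int.truncdiv n 3 - 1 else PySem.Int.truncdiv n 3) ≤ 0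
    · rw [dif_pos hstop, solB_nonpos _ (hstep ▸ hstop)]
      simp only [List.map_cons, List.map_nil, List.reverse_cons, List.reverse_nil,
        List.nil_append]
      rw [char_match n hn]
    · have hlt := pvStepA_lt n hstop
      rw [dif_neg hstop, ih _ (by omega) (by omega)]
      rw [← hstep]
      simp only [List.map_cons, List.reverse_cons]
      rw [char_match n hn]

-- every entry of A's temp list is 4, 1 or 2
theorem solLoopA_digits_aux (k : Nat) : ∀ (n : Int), n.toNat ≤ k →
    ∀ d ∈ solLoopA n, d = 4 ∨ d = 1 ∨ d = 2 := by
  induction k with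
  | zero =>
    intro n hn d hd
    have hA : (if PySem.Int.mod n 3 = 0 then PySem.Int.truncdiv n 3 - 1 else PySem.Int.truncdiv n 3) ≤ 0 := by
      by_contra h
      exact absurd (pvStepA_lt n h) (by omega)
    rw [solLoopA, dif_pos hA] at hd
    simp only [List.mem_singleton] at hd
    subst hd
    exact digit_val _ (PySem.Int.mod_nonneg n (by omega)) (PySem.Int.mod_lt n (by omega))
  | succ k ih =>
    intro n hn d hd
    by_cases hstop :
      (if PySem.Int.mod n 3 = 0 then PySem.Int.truncdiv n 3 - 1 else PySem.Int.truncdiv n 3) ≤ 0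
    · rw [solLoopA, dif_pos hstop] at hd
      simp only [List.mem_singleton] at hd
      subst hd
      exact digit_val _ (PySem.Int.mod_nonneg n (by omega)) (PySem.Int.mod_lt n (by omega))
    · have hlt := pvStepA_lt n hstop
      rw [solLoopA, dif_neg hstop] at hd
      rcases List.mem_cons.mp hd with rfl | hd
      · exact digit_val _ (PySem.Int.mod_nonneg n (by omega)) (PySem.Int.mod_lt n (by omega))
      · exact ih _ (by omega) d hd

theorem solLoopA_digits (n : Int) : ∀ d ∈ solLoopA n, d = 4 ∨ d = 1 ∨ d = 2 :=
  solLoopA_digits_aux n.toNat n le_rfl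

theorem solLoopA_ne_nil (n : Int) : solLoopA n ≠ [] := by
  rw [solLoopA]; split_ifs <;> simp

-- the accumulated number stays positive once seeded with a positive digit
theorem foldl_digits_pos : ∀ (l : List Int) (a : Int), 1 ≤ a → (∀ d ∈ l, 1 ≤ d) →
    1 ≤ l.foldl (fun a d => a * 10 + d) a := by
  intro l
  induction l with
  | nil => intro a ha _; simpa using ha
  | cons d t ih =>
    intro a ha hd
    simp only [List.foldl_cons]
    exact ih _ (by have := hd d (by simp); nlinarith) (fun x hx => hd x (by simp [hx]))

-- str() of the re-assembled number is exactly the digit characters, most significant first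
theorem toChars_foldl_digits : ∀ (l : List Int), l ≠ [] → (∀ d ∈ l, d = 4 ∨ d = 1 ∨ d = 2) →
    PySem.Int.toChars (l.foldl (fun a d => a * 10 + d) 0) = l.map pvChr := by
  intro l
  induction l using List.reverseRecOn with
  | nil => intro h; exact absurd rfl h
  | append_singleton t d ih =>
    intro _ hd
    have hdmem : d = 4 ∨ d = 1 ∨ d = 2 := hd d (by simp)
    rcases List.eq_nil_or_concat' t with rfl | ht
    · simp only [List.nil_append, List.foldl_cons, List.foldl_nil, List.map_cons, List.map_nil]
      rcases hdmem with rfl | rfl | rfl <;> rfl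
    · have htne : t ≠ [] := by rcases ht with ⟨l', x, rfl⟩; simp
      have htd : ∀ x ∈ t, x = 4 ∨ x = 1 ∨ x = 2 := fun x hx => hd x (by simp [hx])
      have hm : 1 ≤ t.foldl (fun a d => a * 10 + d) 0 := by
        rcases t with _ | ⟨d0, t'⟩
        · exact absurd rfl htne
        · have hd0 : d0 = 4 ∨ d0 = 1 ∨ d0 = 2 := htd d0 (by simp)
          simp only [List.foldl_cons]
          refine foldl_digits_pos t' (0 * 10 + d0) (by omega) ?_
          intro x hx
          rcases htd x (by simp [hx]) with rfl | rfl | rfl <;> omega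
      set m := t.foldl (fun a d => a * 10 + d) 0 with hmdef
      have hfold : (t ++ [d]).foldl (fun a d => a * 10 + d) 0 = m * 10 + d := by
        simp [List.foldl_append, hmdef]
      rw [hfold]
      have hM : ((m.toNat : Int)) = m := Int.toNat_of_nonneg (by omega)
      have hD : ((d.toNat : Int)) = d := Int.toNat_of_nonneg (by rcases hdmem with rfl | rfl | rfl <;> omega)
      have htn : (m * 10 + d).toNat = 10 * m.toNat + d.toNat := by omega
      have hnn : ¬ (m * 10 + d < 0) := by rcases hdmem with rfl | rfl | rfl <;> omega
      have hIH : PySem.Int.toChars m = t.map pvChr := ih htne htd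
      have hmChars : Nat.toDigits 10 m.toNat = t.map pvChr := by
        have h' : PySem.Int.toChars m = Nat.toDigits 10 m.toNat := by
          simp only [PySem.Int.toChars, if_neg (by omega : ¬ m < 0)]
        rw [← h', hIH]
      have happ := Nat.toDigits_append_toDigits (b := 10) (n := m.toNat) (d := d.toNat)
        (by omega) (by omega) (by rcases hdmem with rfl | rfl | rfl <;> omega)
      have hdc : Nat.toDigits 10 d.toNat = [Nat.digitChar d.toNat] :=
        Nat.toDigits_of_lt_base (by rcases hdmem with rfl | rfl | rfl <;> omega)
      simp only [PySem.Int.toChars, if_neg hnn, htn, ← happ, hdc, hmChars, List.map_append,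
        List.map_cons, List.map_nil]
      rfl

-- shifting lemma relating the two accumulation orders of A's second loop
theorem foldl_shift : ∀ (l : List Int) (a : Int),
    l.foldl (fun a d => (a + d) * 10) (a * 10) = (l.foldl (fun a d => a * 10 + d) a) * 10 := by
  intro l
  induction l with
  | nil => intro a; rfl
  | cons d t ih =>
    intro a
    simp only [List.foldl_cons]
    exact ih (a * 10 + d)

-- A's index loop over temp re-assembles the digits as a decimal number
theorem pyfold_eq (l : List Int) (hne : l ≠ []) :
    (PySem.List.pyRange 0 (PySem.List.len l) 1).foldl
      (fun answer i =>
        let answer := answer + PySem.List.pyGetD l i 0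
        if i ≠ PySem.List.len l - 1 then answer * 10 else answer) 0
    = l.foldl (fun a d => a * 10 + d) 0 := by
  induction l using List.reverseRecOn with
  | nil => exact absurd rfl hne
  | append_singleton t d _ =>
    have hlen : PySem.List.len (t ++ [d]) = (t.length : Int) + 1 := by
      simp [PySem.List.len]
    rw [hlen]
    rw [PySem.List.pyRange_one_succ_right (by positivity)]
    rw [List.foldl_append]
    have hpre : (PySem.List.pyRange 0 (t.length : Int) 1).foldl
        (fun answer i =>
          let answer := answer + PySem.List.pyGetD (t ++ [d]) i 0
          if i ≠ (t.length : Int) + 1 - 1 then answer * 10 else answer) 0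
        = t.foldl (fun a x => (a + x) * 10) 0 := by
      rw [PySem.List.foldl_congr_mem _ _
        (fun acc i => (acc + PySem.List.pyGetD t i 0) * 10) 0 ?_]
      · exact PySem.List.foldl_pyRange_zero_pyGetD' t 0 (fun a x => (a + x) * 10) 0
      · intro acc x hx
        rcases PySem.List.mem_pyRange_one.mp hx with ⟨hx0, hx1⟩
        have hxe : x ≠ (t.length : Int) + 1 - 1 := by omega
        simp only [hxe, if_true, ne_eq, not_false_iff]
        have h1 : PySem.List.pyGetD (t ++ [d]) x 0 = (t ++ [d])[x.toNat]'(by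
            rw [List.length_append]; omega) := by
          apply PySem.List.pyGetD_eq_getElem _ _ hx0
          rw [List.length_append]; push_cast; omega
        have h2 : PySem.List.pyGetD t x 0 = t[x.toNat]'(by omega) := by
          apply PySem.List.pyGetD_eq_getElem _ _ hx0; omega
        have h3 : (t ++ [d])[x.toNat]'(by rw [List.length_append]; omega)
            = t[x.toNat]'(by omega) := List.getElem_append_left (by omega)
        rw [h1, h2, h3]
    rw [hpre]
    have hlast : PySem.List.pyGetD (t ++ [d]) ((t.length : Int)) 0 = d := by
      have h' := PySem.List.pyGetD_eq_getElem (t ++ [d]) (i := (t.length : Int)) 0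
        (by positivity) (by simp)
      rw [h']
      simp
    simp only [List.foldl_cons, List.foldl_nil]
    rw [if_neg (by simp), hlast]
    have hs := foldl_shift t 0
    rw [show ((0 : Int) * 10) = 0 from by ring] at hs
    rw [hs]
    simp [List.foldl_append]

-- ===== VERDICT (by name: the statement is the Claim_ definition above) =====
theorem solution_spec : Claim_equal_solution := by
  unfold Claim_equal_solution
  intro n _ hpre
  unfold Spec_solution solution solution_alt
  have hn1 : (1 : Int) ≤ n := hpre
  rw [if_neg (by simp; omega)]
  have hne : solLoopA n ≠ [] := solLoopA_ne_nil n
  have hrevne : (solLoopA n).reverse ≠ [] := by simpa using hne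
  have hdig : ∀ d ∈ (solLoopA n).reverse, d = 4 ∨ d = 1 ∨ d = 2 := by
    intro d hd; exact solLoopA_digits n d (List.mem_reverse.mp hd)
  simp only
  rw [pyfold_eq _ hrevne]
  rw [show PySem.Int.toStr ((solLoopA n).reverse.foldl (fun a d => a * 10 + d) 0)
        = String.ofList (PySem.Int.toChars ((solLoopA n).reverse.foldl (fun a d => a * 10 + d) 0))
      from rfl]
  rw [toChars_foldl_digits _ hrevne hdig]
  rw [loop_corr n.toNat n le_rfl hn1]
  simp [List.map_reverse]
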